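-- pv_equiv track=rewrite | github.com/aqntks/PSis | passport_scan.py | remove_intersect_box
-- ===== SOURCE A (Python) =====
-- def compute_intersect_ratio(rect1, rect2):
--     x1, y1, x2, y2 = rect1[0], rect1[1], rect1[2], rect1[3]
--     x3, y3, x4, y4 = rect2[0], rect2[1], rect2[2], rect2[3]
--
--     if x2 < x3: return 0
--     if x1 > x4: return 0
--     if y2 < y3: return 0
--     if y1 > y4: return 0
--
--     left_up_x = max(x1, x3)
--     left_up_y = max(y1, y3)
--     right_down_x = min(x2, x4)
--     right_down_y = min(y2, y4)
--
--     width = right_down_x - left_up_x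
--     height = right_down_y - left_up_y
--
--     original = (y2 - y1) * (x2 - x1)
--     intersect = width * height
--
--     ratio = int(intersect / original * 100)
--
--     return ratio
--
-- def remove_intersect_box(mrzLine):
--     i, line = 0, mrzLine.copy()
--     while True:
--         if i > len(line) - 2: break
--         if compute_intersect_ratio(line[i][0], line[i+1][0]) > 30:
--             lose = i if line[i][2] < line[i+1][2] else i+1
--             del line[lose]
--         else: i += 1
--
--     return line
-- ===== SOURCE B (Python) =====
-- def _overlap_ratio(r1, r2):
--     if r1[2] < r2[0] or r1[0] > r2[2] or r1[3] < r2[1] or r1[1] > r2[3]: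
--         return 0
--     w = min(r1[2], r2[2]) - max(r1[0], r2[0])
--     h = min(r1[3], r2[3]) - max(r1[1], r2[1])
--     return int(w * h / ((r1[3] - r1[1]) * (r1[2] - r1[0])) * 100)
--
-- def remove_intersect_box(mrzLine):
--     result = []
--     champ = None
--     for box in mrzLine:
--         if champ is None:
--             champ = box
--         elif _overlap_ratio(champ[0], box[0]) > 30:
--             if champ[2] < box[2]:
--                 champ = box
--         else:
--             result.append(champ)
--             champ = box
--     if champ is not None:
--         result.append(champ)
--     return result
-- ===== Notes on version B (the rewrite author's own statement) =====
-- stated objective: simpler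
-- what changed: A's index-juggling while loop that deletes the losing box in place (staying put to re-compare) is replaced by a single forward pass keeping a running champion box that is appended to a result list when the next box does not overlap it; B's overlap helper also folds A's four early-return guards into one combined disjointness test.
-- outside the precondition, e.g. on remove_intersect_box([([0, 0], 0, 1), ([0, 0], 0, 2)]): A raises IndexError, B raises IndexError
import Mathlib
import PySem

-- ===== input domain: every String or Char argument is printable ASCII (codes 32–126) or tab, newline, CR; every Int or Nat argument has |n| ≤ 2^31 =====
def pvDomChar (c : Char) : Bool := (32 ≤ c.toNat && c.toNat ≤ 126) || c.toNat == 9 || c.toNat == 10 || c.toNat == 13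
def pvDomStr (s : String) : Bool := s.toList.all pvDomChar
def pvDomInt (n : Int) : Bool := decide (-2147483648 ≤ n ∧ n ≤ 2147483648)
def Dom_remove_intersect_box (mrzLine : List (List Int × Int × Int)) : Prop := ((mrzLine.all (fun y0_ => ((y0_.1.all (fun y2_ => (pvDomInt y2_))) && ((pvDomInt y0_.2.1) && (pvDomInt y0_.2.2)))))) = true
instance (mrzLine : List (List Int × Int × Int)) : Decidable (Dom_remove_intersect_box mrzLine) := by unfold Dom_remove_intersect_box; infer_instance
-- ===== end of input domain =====

-- B replaces A's index-and-delete while loop by a single forward pass keeping a running champion box (same return value; A copies its argument, neither version mutates the input).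

-- ===== PORT A =====
-- A's module helper `compute_intersect_ratio`.
-- Python computes `int(intersect / original * 100)` with IEEE-754 double arithmetic;
-- pvDivNE/pvDivPow/pvRoundMant model the correctly-rounded (round-to-nearest, ties-to-even)
-- 53-bit results of `intersect / original` and `· * 100` exactly for the magnitudes Dom admits
-- (no overflow/subnormals there), and the final truncation toward zero is exact integer arithmetic.

-- round-to-nearest-even integer of a/b (b > 0)
def pvDivNE (a b : Nat) : Nat :=
  let q := a / b
  let r := a % b
  if b < 2 * r then q + 1
  else if 2 * r < b then q
  else if q % 2 = 0 then q else q + 1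

-- round-to-nearest-even integer of num / (den * 2^e)
def pvDivPow (num den : Nat) (e : Int) : Nat :=
  if 0 ≤ e then pvDivNE num (den * 2 ^ e.toNat) else pvDivNE (num * 2 ^ (-e).toNat) den

-- (m, e) with m * 2^e = the double nearest num/den, 2^52 ≤ m < 2^53 (num, den > 0)
def pvRoundMant (num den : Nat) : Nat × Int :=
  let e1 : Int := (PySem.Int.bitLength (num : Int) : Int) - (PySem.Int.bitLength (den : Int) : Int) - 53
  let q1 := pvDivPow num den e1
  if q1 < 2 ^ 53 then (q1, e1)
  else
    let q2 := pvDivPow num den (e1 + 1)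
    if q2 < 2 ^ 53 then (q2, e1 + 1) else (2 ^ 52, e1 + 2)

-- int(i / o * 100) under IEEE-754 double semantics; exact whenever o ≠ 0 and the doubles stay normal
def pvTruncDivMul100 (i o : Int) : Int :=
  if i = 0 then 0
  else
    let s : Int := if decide (i < 0) ≠ decide (o < 0) then -1 else 1
    let p := pvRoundMant i.natAbs o.natAbs
    let p2 := pvRoundMant (p.1 * 100) 1
    let E := p.2 + p2.2
    let n : Nat := if 0 ≤ E then p2.1 * 2 ^ E.toNat else p2.1 / 2 ^ (-E).toNat
    s * n

-- transliteration of compute_intersect_ratio; rect indexing is faithful for rects of length ≥ 4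
-- (shorter rects raise IndexError in Python) and `original = 0` raises ZeroDivisionError —
-- both excluded by Pre_; the helper returns 0 there only to stay total.
def compute_intersect_ratio (rect1 rect2 : List Int) : Int :=
  let x1 := rect1.getD 0 0
  let y1 := rect1.getD 1 0
  let x2 := rect1.getD 2 0
  let y2 := rect1.getD 3 0
  let x3 := rect2.getD 0 0
  let y3 := rect2.getD 1 0
  let x4 := rect2.getD 2 0
  let y4 := rect2.getD 3 0
  if x2 < x3 then 0
  else if x1 > x4 then 0
  else if y2 < y3 then 0
  else if y1 > y4 then 0
  else
    let left_up_x := max x1 x3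
    let left_up_y := max y1 y3
    let right_down_x := min x2 x4
    let right_down_y := min y2 y4
    let width := right_down_x - left_up_x
    let height := right_down_y - left_up_y
    let original := (y2 - y1) * (x2 - x1)
    let intersect := width * height
    if original = 0 then 0 else pvTruncDivMul100 intersect original

def pvDflt : List Int × Int × Int := ([], 0, 0)

-- A's while loop: state (i, line); indexing via getD is faithful because the loop guard keeps i+1 < line.length
def removeLoop (line : List (List Int × Int × Int)) (i : Nat) : List (List Int × Int × Int) :=
  if h : (i : Int) > (line.length : Int) - 2 then line
  else
    let b1 := line.getD i pvDflt
    let b2 := line.getD (i + 1) pvDflt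
    if compute_intersect_ratio b1.1 b2.1 > 30 then
      removeLoop (line.eraseIdx (if b1.2.2 < b2.2.2 then i else i + 1)) i
    else
      removeLoop line (i + 1)
termination_by line.length - i
decreasing_by
  · simp only [not_lt] at h
    simp only [List.length_eraseIdx]
    split <;> split <;> omega
  · omega

def remove_intersect_box (mrzLine : List (List Int × Int × Int)) : List (List Int × Int × Int) :=
  removeLoop mrzLine 0

-- ===== PORT B =====
-- Source B's own float model, written its own way: round-half-up with an even-tie correction,
-- bit-shifts for the power-of-two scaling, and a fuel-2 search for the mantissa exponent.
-- It models the same IEEE-754 double semantics of `int(w * h / original * 100)`.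

-- round-to-nearest-even integer of a/b (b > 0): half-up quotient, corrected on even ties
def bDivNE (a b : Nat) : Nat :=
  let q := (2 * a + b) / (2 * b)
  if 2 * (a % b) = b ∧ q % 2 = 1 then q - 1 else q

-- round-to-nearest-even integer of num / (den * 2^e), via shifts
def bRound (num den : Nat) (e : Int) : Nat :=
  if e < 0 then bDivNE (num <<< (-e).toNat) den else bDivNE num (den <<< e.toNat)

-- search the exponent giving a 53-bit mantissa (at most two steps are ever needed)
def bMantGo (num den : Nat) : Int → Nat → Nat × Int
  | e, 0 => (2 ^ 52, e)
  | e, fuel + 1 =>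
    let q := bRound num den e
    if q < 2 ^ 53 then (q, e) else bMantGo num den (e + 1) fuel

def bMant (num den : Nat) : Nat × Int :=
  bMantGo num den ((PySem.Int.bitLength (num : Int) : Int) - (PySem.Int.bitLength (den : Int) : Int) - 53) 2

-- int(i / o * 100) under double semantics (0 when o = 0 only to stay total; Python raises there)
def bTrunc (i o : Int) : Int :=
  if o = 0 then 0
  else if i = 0 then 0
  else
    let neg := decide (i < 0) ≠ decide (o < 0)
    let p := bMant i.natAbs o.natAbs
    let p2 := bMant (p.1 * 100) 1
    let t := p.2 + p2.2
    let mag : Nat := if t < 0 then p2.1 >>> (-t).toNat else p2.1 <<< t.toNat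
    if neg then -(mag : Int) else (mag : Int)

-- Source B's `_overlap_ratio`: one combined disjointness guard, inline min/max
def overlap_ratio (r1 r2 : List Int) : Int :=
  if r1.getD 2 0 < r2.getD 0 0 ∨ r1.getD 0 0 > r2.getD 2 0 ∨
     r1.getD 3 0 < r2.getD 1 0 ∨ r1.getD 1 0 > r2.getD 3 0 then 0
  else
    let w := min (r1.getD 2 0) (r2.getD 2 0) - max (r1.getD 0 0) (r2.getD 0 0)
    let h := min (r1.getD 3 0) (r2.getD 3 0) - max (r1.getD 1 0) (r2.getD 1 0)
    bTrunc (w * h) ((r1.getD 3 0 - r1.getD 1 0) * (r1.getD 2 0 - r1.getD 0 0))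

-- forward pass with running champion (Source B's loop; champ = None only before the first element,
-- so the match on the head is the faithful rendering)
def champLoop (champ : List Int × Int × Int) (rest acc : List (List Int × Int × Int)) :
    List (List Int × Int × Int) :=
  match rest with
  | [] => acc ++ [champ]
  | box :: rs =>
    if overlap_ratio champ.1 box.1 > 30 then
      if champ.2.2 < box.2.2 then champLoop box rs acc else champLoop champ rs acc
    else
      champLoop box rs (acc ++ [champ])

def remove_intersect_box_alt (mrzLine : List (List Int × Int × Int)) : List (List Int × Int × Int) :=
  match mrzLine with
  | [] => []
  | b :: rest => champLoop b rest []

-- ===== PRECONDITION & SPEC =====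
def pvArea (b : List Int × Int × Int) : Int :=
  (b.1.getD 3 0 - b.1.getD 1 0) * (b.1.getD 2 0 - b.1.getD 0 0)

-- Pre_ excludes the inputs where A raises: IndexError when a compared rect has fewer than 4 entries,
-- ZeroDivisionError when a zero-area rect1 overlaps its neighbour. It is slightly narrower than A's
-- exact domain: a short or zero-area non-last box that happens never to enter an overlapping
-- comparison is also excluded (A returns there and B agrees; see the cited example).
def Pre_remove_intersect_box (mrzLine : List (List Int × Int × Int)) : Prop :=
  mrzLine.length ≤ 1 ∨
    ((∀ b ∈ mrzLine, 4 ≤ b.1.length) ∧ (∀ b ∈ mrzLine.dropLast, pvArea b ≠ 0))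
instance (mrzLine : List (List Int × Int × Int)) : Decidable (Pre_remove_intersect_box mrzLine) := by
  unfold Pre_remove_intersect_box; infer_instance

def pvWitness_remove_intersect_box : (List (List Int × Int × Int)) :=
  [([0, 0, 2, 2], 0, 5), ([1, 1, 3, 3], 0, 7)]

def Spec_remove_intersect_box (mrzLine : List (List Int × Int × Int)) (out : List (List Int × Int × Int)) : Prop := out = remove_intersect_box_alt mrzLine
instance (mrzLine : List (List Int × Int × Int)) (out : List (List Int × Int × Int)) : Decidable (Spec_remove_intersect_box mrzLine out) := by unfold Spec_remove_intersect_box; infer_instance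

-- ===== CLAIM (what is proved, stated in full; the proofs are below) =====
def Claim_equal_remove_intersect_box : Prop := ∀ (mrzLine : List (List Int × Int × Int)), Dom_remove_intersect_box mrzLine → Pre_remove_intersect_box mrzLine → Spec_remove_intersect_box mrzLine (remove_intersect_box mrzLine)

-- ===== LEMMAS AND PROOFS =====

-- B's half-up-with-correction rounding agrees with A's three-way comparison form
lemma bDivNE_eq (a b : Nat) (hb : 0 < b) : bDivNE a b = pvDivNE a b := by
  have key : ∀ q r : Nat, r < b → (2 * (b * q + r) + b) / (2 * b) = q + (if b ≤ 2 * r then 1 else 0) := by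
    intro q r hr
    have h1 : 2 * (b * q + r) + b = (2 * r + b) + (2 * b) * q := by ring
    rw [h1, Nat.add_mul_div_left _ _ (by omega : 0 < 2 * b)]
    split
    · have h2 : (2 * r + b) / (2 * b) = 1 := Nat.div_eq_of_lt_le (by omega) (by omega)
      omega
    · have h2 : (2 * r + b) / (2 * b) = 0 := Nat.div_eq_of_lt (by omega)
      omega
  have hr : a % b < b := Nat.mod_lt a hb
  have hdm : b * (a / b) + a % b = a := Nat.div_add_mod a b
  have k2 := key (a / b) (a % b) hr
  rw [show 2 * (b * (a / b) + a % b) + b = 2 * a + b by omega] at k2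
  by_cases hbr : b ≤ 2 * (a % b)
  · rw [if_pos hbr] at k2
    clear key
    simp only [bDivNE, pvDivNE, k2]
    split_ifs <;> first | omega | simp
  · rw [if_neg hbr] at k2
    clear key
    simp only [bDivNE, pvDivNE, k2]
    split_ifs <;> omega

lemma bRound_eq (num den : Nat) (e : Int) (hden : 0 < den) :
    bRound num den e = pvDivPow num den e := by
  unfold bRound pvDivPow
  by_cases h : e < 0
  · rw [if_pos h, if_neg (by omega), Nat.shiftLeft_eq, bDivNE_eq _ _ hden]
  · rw [if_neg h, if_pos (by omega), Nat.shiftLeft_eq,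
      bDivNE_eq _ _ (by positivity)]

lemma bMant_eq (num den : Nat) (hden : 0 < den) : bMant num den = pvRoundMant num den := by
  unfold bMant pvRoundMant
  simp only [bMantGo, bRound_eq num den _ hden]
  split_ifs <;> simp
  omega

lemma bTrunc_eq (i o : Int) :
    bTrunc i o = if o = 0 then 0 else pvTruncDivMul100 i o := by
  simp only [bTrunc, pvTruncDivMul100]
  by_cases ho : o = 0
  · simp [ho]
  by_cases hi : i = 0
  · simp [ho, hi]
  simp only [if_neg ho, if_neg hi]
  rw [bMant_eq _ _ (Int.natAbs_pos.mpr ho), bMant_eq _ _ one_pos]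
  set p := pvRoundMant i.natAbs o.natAbs with hp
  set p2 := pvRoundMant (p.1 * 100) 1 with hp2
  by_cases hE : p.2 + p2.2 < 0
  · rw [if_pos hE, if_neg (by omega : ¬ 0 ≤ p.2 + p2.2), Nat.shiftRight_eq_div_pow]
    split_ifs <;> push_cast <;> ring
  · rw [if_neg hE, if_pos (by omega : 0 ≤ p.2 + p2.2), Nat.shiftLeft_eq]
    split_ifs <;> push_cast <;> ring

-- Source B's combined-guard ratio helper equals A's compute_intersect_ratio on every input
lemma ratio_eq (r1 r2 : List Int) :
    overlap_ratio r1 r2 = compute_intersect_ratio r1 r2 := by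
  simp only [overlap_ratio, compute_intersect_ratio]
  rw [bTrunc_eq]
  split_ifs <;> first | rfl | omega

lemma champLoop_acc (rest : List (List Int × Int × Int)) :
    ∀ champ acc, champLoop champ rest acc = acc ++ champLoop champ rest [] := by
  induction rest with
  | nil => intro champ acc; simp [champLoop]
  | cons box rs ih =>
    intro champ acc
    simp only [champLoop]
    split
    · split
      · exact ih box acc
      · exact ih champ acc
    · rw [ih box (acc ++ [champ])]
      simp only [List.nil_append]
      rw [ih box [champ]]
      simp

lemma removeLoop_eq_champLoop (rest : List (List Int × Int × Int)) :
    ∀ (champ : List Int × Int × Int) (pre : List (List Int × Int × Int)),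
      removeLoop (pre ++ champ :: rest) pre.length = pre ++ champLoop champ rest [] := by
  induction rest with
  | nil =>
    intro champ pre
    rw [removeLoop]
    rw [dif_pos (by simp; omega)]
    simp [champLoop]
  | cons box rs ih =>
    intro champ pre
    rw [removeLoop]
    rw [dif_neg (by simp; omega)]
    have h1 : (pre ++ champ :: box :: rs).getD pre.length pvDflt = champ := by
      simp [List.getD]
    have h2 : (pre ++ champ :: box :: rs).getD (pre.length + 1) pvDflt = box := by
      simp [List.getD]
    simp only [h1, h2, champLoop, ratio_eq]
    split
    · split
      · have he : (pre ++ champ :: box :: rs).eraseIdx pre.length = pre ++ box :: rs := by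
          rw [List.eraseIdx_append_of_length_le (Nat.le_refl pre.length)]
          simp
        rw [he]; exact ih box pre
      · have he : (pre ++ champ :: box :: rs).eraseIdx (pre.length + 1) = pre ++ champ :: rs := by
          rw [List.eraseIdx_append_of_length_le (Nat.le_succ_of_le (Nat.le_refl pre.length))]
          simp
        rw [he]; exact ih champ pre
    · have hre : pre.length + 1 = (pre ++ [champ]).length := by simp
      have hli : pre ++ champ :: box :: rs = (pre ++ [champ]) ++ box :: rs := by simp
      rw [hre, hli, ih box (pre ++ [champ])]
      simp only [List.nil_append]
      rw [champLoop_acc rs box [champ]]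
      simp

-- ===== VERDICT (by name: the statement is the Claim_ definition above) =====
theorem remove_intersect_box_spec : Claim_equal_remove_intersect_box := by
  intro mrzLine _ _
  unfold Spec_remove_intersect_box remove_intersect_box remove_intersect_box_alt
  match mrzLine with
  | [] => rw [removeLoop]; simp
  | b :: rest => exact removeLoop_eq_champLoop rest b []
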